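-- pv_equiv track=rewrite | github.com/kazuhiko1979/edabit | 176_hard_Combined Vector Sequence.py | has_consecutive_series
-- ===== SOURCE A (Python) =====
-- from itertools import zip_longest
--
-- def has_consecutive_series(v1, v2):
-- 	z = []
--
-- 	for i in list(zip_longest(v1, v2)):
-- 		i = list(i)
-- 		if i[0] is None:
-- 			i[0] = 0
-- 		if i[1] is None:
-- 			i[1] = 0
-- 		else:
-- 			z.append(i[0]+i[1])
--
-- 	return sorted(z) == list(range(min(z), max(z)+1))
-- ===== SOURCE B (Python) =====
-- def has_consecutive_series(v1, v2):
--     # Pad/truncate v1 to len(v2), add componentwise, then O(n) check: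
--     # a list is a permutation of a consecutive range iff its values are
--     # pairwise distinct and max - min + 1 equals its length.
--     w = v1[:len(v2)] + [0] * (len(v2) - len(v1))
--     z = [a + b for a, b in zip(w, v2)]
--     return len(set(z)) == len(z) and max(z) - min(z) + 1 == len(z)
-- ===== Notes on version B (the rewrite author's own statement) =====
-- stated objective: faster
-- what changed: B builds the combined vector by zero-padding v1 to len(v2) and zipping, then replaces A's sort-and-compare-to-range test with the O(n) characterization 'all elements distinct (set size) and max－min+1 == length'.
import Mathlib
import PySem

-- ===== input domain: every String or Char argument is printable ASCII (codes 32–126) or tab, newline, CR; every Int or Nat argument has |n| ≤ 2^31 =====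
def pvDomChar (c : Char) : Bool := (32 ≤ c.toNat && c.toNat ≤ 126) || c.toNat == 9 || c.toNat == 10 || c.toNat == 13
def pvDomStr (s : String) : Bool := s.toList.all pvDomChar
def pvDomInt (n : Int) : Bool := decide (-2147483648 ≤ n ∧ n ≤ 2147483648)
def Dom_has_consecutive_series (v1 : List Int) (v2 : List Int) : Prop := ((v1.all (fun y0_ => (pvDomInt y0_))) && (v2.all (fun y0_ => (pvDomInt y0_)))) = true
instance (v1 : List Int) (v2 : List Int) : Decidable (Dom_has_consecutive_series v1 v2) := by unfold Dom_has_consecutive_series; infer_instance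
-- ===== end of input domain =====

-- B replaces A's sort-and-compare with an O(n) distinct-count + max-min+1 == len check (same value everywhere A returns).

-- ===== PORT A =====
-- itertools.zip_longest(v1, v2) with None-fill, as Option
def pvZipLongest : List Int → List Int → List (Option Int × Option Int)
  | [], [] => []
  | x :: xs, [] => (some x, none) :: pvZipLongest xs []
  | [], y :: ys => (none, some y) :: pvZipLongest [] ys
  | x :: xs, y :: ys => (some x, some y) :: pvZipLongest xs ys

-- one iteration of A's for-loop: i[0] defaulted to 0; append i[0]+i[1] only when i[1] is not None
def pvStepA (z : List Int) (p : Option Int × Option Int) : List Int :=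
  let a := match p.1 with | none => 0 | some a => a
  match p.2 with
  | none => z
  | some b => z ++ [a + b]

def has_consecutive_series (v1 : List Int) (v2 : List Int) : Bool :=
  let z := (pvZipLongest v1 v2).foldl pvStepA []
  -- min(z) / max(z) raise ValueError on empty z (excluded by Pre_)
  match PySem.List.min? z (fun x => x), PySem.List.max? z (fun x => x) with
  | some mn, some mx =>
      decide (PySem.List.sorted z (fun x => x) false = PySem.List.pyRange mn (mx + 1) 1)
  | _, _ => false

-- ===== PORT B =====
def has_consecutive_series_alt (v1 : List Int) (v2 : List Int) : Bool :=
  let w := PySem.List.slice v1 none (some (v2.length : Int)) ++ List.replicate (v2.length - v1.length) 0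
  let z := (w.zip v2).map (fun p => p.1 + p.2)
  if PySem.Set.len (PySem.Set.ofList z) = (z.length : Int) then
    -- max(z) / min(z) raise ValueError on empty z (excluded by Pre_)
    match PySem.List.max? z (fun x => x) with
    | none => false
    | some mx =>
      match PySem.List.min? z (fun x => x) with
      | none => false
      | some mn => decide (mx - mn + 1 = (z.length : Int))
  else false

-- ===== PRECONDITION & SPEC =====
-- Pre_ excludes exactly v2 = [], where the combined list z is empty and A's min(z) raises ValueError (B's max(z) raises too).
def Pre_has_consecutive_series (v1 : List Int) (v2 : List Int) : Prop := v2 ≠ []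
instance (v1 : List Int) (v2 : List Int) : Decidable (Pre_has_consecutive_series v1 v2) := by unfold Pre_has_consecutive_series; infer_instance
def pvWitness_has_consecutive_series : List Int × List Int := ([1, 3], [1, 0])

def Spec_has_consecutive_series (v1 : List Int) (v2 : List Int) (out : Bool) : Prop := out = has_consecutive_series_alt v1 v2
instance (v1 : List Int) (v2 : List Int) (out : Bool) : Decidable (Spec_has_consecutive_series v1 v2 out) := by unfold Spec_has_consecutive_series; infer_instance

-- ===== CLAIM (what is proved, stated in full; the proofs are below) =====
def Claim_equal_has_consecutive_series : Prop := ∀ (v1 : List Int) (v2 : List Int), Dom_has_consecutive_series v1 v2 → Pre_has_consecutive_series v1 v2 → Spec_has_consecutive_series v1 v2 (has_consecutive_series v1 v2)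

-- ===== LEMMAS AND PROOFS =====

-- the combined vector both programs build: v1 zero-padded/truncated to v2's length, added to v2
def pvZ : List Int → List Int → List Int
  | _, [] => []
  | [], y :: ys => y :: pvZ [] ys
  | x :: xs, y :: ys => (x + y) :: pvZ xs ys

lemma pvZipLongest_nil_foldl (v1 : List Int) (acc : List Int) :
    (pvZipLongest v1 []).foldl pvStepA acc = acc := by
  induction v1 generalizing acc with
  | nil => simp [pvZipLongest]
  | cons x xs ih => simp [pvZipLongest, pvStepA, ih]

lemma zA_eq (v2 : List Int) : ∀ (v1 acc : List Int),
    (pvZipLongest v1 v2).foldl pvStepA acc = acc ++ pvZ v1 v2 := by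
  induction v2 with
  | nil => intro v1 acc; simp [pvZ, pvZipLongest_nil_foldl]
  | cons y ys ih =>
    intro v1 acc
    cases v1 with
    | nil => simp [pvZipLongest, pvStepA, pvZ, ih]
    | cons x xs => simp [pvZipLongest, pvStepA, pvZ, ih]

lemma zB_eq (v2 : List Int) : ∀ (v1 : List Int),
    ((v1.take v2.length ++ List.replicate (v2.length - v1.length) 0).zip v2).map
      (fun p : Int × Int => p.1 + p.2) = pvZ v1 v2 := by
  induction v2 with
  | nil => intro v1; simp [pvZ]
  | cons y ys ih =>
    intro v1
    cases v1 with
    | nil => simpa [pvZ, List.replicate_succ] using ih []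
    | cons x xs => simpa [pvZ] using ih xs

lemma pvZ_ne_nil (v1 v2 : List Int) (h : v2 ≠ []) : pvZ v1 v2 ≠ [] := by
  cases v2 with
  | nil => exact absurd rfl h
  | cons y ys => cases v1 <;> simp [pvZ]

lemma len_ofList_eq_iff (z : List Int) :
    (PySem.Set.ofList z).length = z.length ↔ z.Nodup := by
  have hperm : (PySem.Set.ofList z).Perm z.dedup :=
    (List.perm_ext_iff_of_nodup (PySem.Set.nodup_ofList z) (List.nodup_dedup z)).2
      (by intro a; simp [PySem.Set.mem_ofList, List.mem_dedup])
  have hlen : (PySem.Set.ofList z).length = z.dedup.length := hperm.length_eq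
  constructor
  · intro h
    have hsub : z.dedup.Sublist z := List.dedup_sublist z
    have : z.dedup = z := hsub.eq_of_length (by omega)
    rw [← this]; exact List.nodup_dedup z
  · intro h
    rw [hlen, List.Nodup.dedup h]

lemma consec_char (z : List Int) (mn mx : Int)
    (hmn : PySem.List.min? z (fun x => x) = some mn)
    (hmx : PySem.List.max? z (fun x => x) = some mx) :
    (PySem.List.sorted z (fun x => x) false = PySem.List.pyRange mn (mx + 1) 1) ↔
      (z.Nodup ∧ mx - mn + 1 = (z.length : Int)) := by
  have hmnz : mn ∈ z := PySem.List.min?_mem hmn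
  have hmnmx : mn ≤ mx := PySem.List.max?_isMax hmx mn hmnz
  constructor
  · intro h
    have hperm : (PySem.List.pyRange mn (mx + 1) 1).Perm z := by
      rw [← h]; exact PySem.List.sorted_perm z (fun x => x) false
    refine ⟨hperm.nodup (PySem.List.nodup_pyRange_one mn (mx + 1)), ?_⟩
    have hl := hperm.length_eq
    rw [PySem.List.length_pyRange_one] at hl
    omega
  · rintro ⟨hnd, hlen⟩
    have hsub : z.toFinset ⊆ Finset.Icc mn mx := by
      intro x hx
      rw [List.mem_toFinset] at hx
      exact Finset.mem_Icc.2 ⟨PySem.List.min?_isMin hmn x hx, PySem.List.max?_isMax hmx x hx⟩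
    have hcardz : z.toFinset.card = z.length := List.toFinset_card_of_nodup hnd
    have hcardI : (Finset.Icc mn mx).card = (mx + 1 - mn).toNat := Int.card_Icc mn mx
    have heq : z.toFinset = Finset.Icc mn mx :=
      Finset.eq_of_subset_of_card_le hsub (by omega)
    have hmem : ∀ a : Int, a ∈ PySem.List.pyRange mn (mx + 1) 1 ↔ a ∈ z := by
      intro a
      rw [PySem.List.mem_pyRange_one, ← List.mem_toFinset, heq, Finset.mem_Icc]
      omega
    have hperm : (PySem.List.pyRange mn (mx + 1) 1).Perm z :=
      (List.perm_ext_iff_of_nodup (PySem.List.nodup_pyRange_one mn (mx + 1)) hnd).2 hmem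
    exact PySem.List.sorted_eq_of_perm_of_pairwise_lt z _ (fun x => x) hperm
      (PySem.List.pairwise_lt_pyRange_one mn (mx + 1))

-- ===== VERDICT (by name: the statement is the Claim_ definition above) =====
theorem has_consecutive_series_spec : Claim_equal_has_consecutive_series := by
  intro v1 v2 _ hpre
  unfold Spec_has_consecutive_series
  simp only [has_consecutive_series, has_consecutive_series_alt, PySem.List.slice_to_natCast,
    zB_eq v2, zA_eq v2, List.nil_append]
  have hne : pvZ v1 v2 ≠ [] := pvZ_ne_nil v1 v2 hpre
  cases hmn : PySem.List.min? (pvZ v1 v2) (fun x => x) with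
  | none => exact absurd ((PySem.List.min?_eq_none_iff _ _).1 hmn) hne
  | some mn =>
  cases hmx : PySem.List.max? (pvZ v1 v2) (fun x => x) with
  | none => exact absurd ((PySem.List.max?_eq_none_iff _ _).1 hmx) hne
  | some mx =>
  simp only [PySem.Set.len, Nat.cast_inj]
  by_cases hnd : (PySem.Set.ofList (pvZ v1 v2)).length = (pvZ v1 v2).length
  · rw [if_pos hnd]
    have hnodup := (len_ofList_eq_iff (pvZ v1 v2)).1 hnd
    exact decide_eq_decide.2 (by rw [consec_char _ mn mx hmn hmx]; tauto)
  · rw [if_neg hnd]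
    refine decide_eq_false (fun h => hnd ?_)
    exact (len_ofList_eq_iff (pvZ v1 v2)).2 ((consec_char _ mn mx hmn hmx).1 h).1
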